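-- pv_equiv track=rewrite | github.com/chaochungkuo/scHTO | src/demultiplexer.py | build_neighbor_dict
-- ===== SOURCE A (Python) =====
-- def generate_neighbors(barcode, alphabet="ACGT"):
--     neighbors = set()
--     barcode = list(barcode)
--     for i in range(len(barcode)):
--         original = barcode[i]
--         for char in alphabet:
--             if char != original:
--                 barcode[i] = char
--                 neighbors.add("".join(barcode))
--         barcode[i] = original  # restore original
--     return neighbors
--
-- def build_neighbor_dict(barcode_to_sample, alphabet="ACGT"):
--     neighbor_dict = {}
--     for barcode, sample in barcode_to_sample.items():
--         for neighbor in generate_neighbors(barcode, alphabet):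
--             # Only add if this neighbor isn't already in the exact dictionary,
--             # or mark as ambiguous if needed.
--             if neighbor not in barcode_to_sample:
--                 if neighbor in neighbor_dict and neighbor_dict[neighbor] != sample:
--                     neighbor_dict[neighbor] = None  # mark ambiguous
--                 else:
--                     neighbor_dict[neighbor] = sample
--     return neighbor_dict
-- ===== SOURCE B (Python) =====
-- def build_neighbor_dict(barcode_to_sample, alphabet="ACGT"):
--     # Phase 1: gather, per neighbor, the list of samples whose barcode is one mismatch away.
--     gathered = {}
--     for barcode, sample in barcode_to_sample.items():
--         for neighbor in dict.fromkeys(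
--             barcode[:i] + c + barcode[i + 1:]
--             for i in range(len(barcode))
--             for c in alphabet
--             if c != barcode[i]
--         ):
--             if neighbor not in barcode_to_sample:
--                 gathered.setdefault(neighbor, []).append(sample)
--     # Phase 2: collapse each sample list to its unique value, or None if ambiguous.
--     return {nb: (ss[0] if all(s == ss[0] for s in ss) else None)
--             for nb, ss in gathered.items()}
-- ===== Notes on version B (the rewrite author's own statement) =====
-- stated objective: alternative
-- what changed: A marks ambiguity on the fly with sticky None overwrites while scanning each barcode's Hamming-1 neighbor set; B gathers, per non-exact neighbor, the list of contributing samples in one pass and then collapses each list to its unique value (or None when the samples disagree) in a second resolution pass, with the neighbor set enumerated by an inline comprehension deduplicated via dict.fromkeys instead of A's mutate-and-restore set builder.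
import Mathlib
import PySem

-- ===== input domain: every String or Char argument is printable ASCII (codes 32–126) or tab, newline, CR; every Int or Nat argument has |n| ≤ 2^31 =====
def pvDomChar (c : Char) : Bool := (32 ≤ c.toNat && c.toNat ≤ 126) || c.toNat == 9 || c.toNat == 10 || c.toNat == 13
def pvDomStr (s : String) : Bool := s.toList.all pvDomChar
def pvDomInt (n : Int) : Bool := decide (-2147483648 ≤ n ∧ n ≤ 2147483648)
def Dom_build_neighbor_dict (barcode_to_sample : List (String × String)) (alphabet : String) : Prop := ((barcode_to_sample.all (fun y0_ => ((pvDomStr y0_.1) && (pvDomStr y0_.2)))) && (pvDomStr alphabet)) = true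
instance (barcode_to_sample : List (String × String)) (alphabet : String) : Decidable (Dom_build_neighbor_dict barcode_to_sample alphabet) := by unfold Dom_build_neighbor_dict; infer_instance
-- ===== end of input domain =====

-- B replaces A's on-the-fly sticky ambiguity marking by a two-phase gather-then-resolve
-- decomposition (collect each neighbor's sample list, then collapse it); objective: alternative.
-- The dict argument is modelled as PySem.Dict.ofList of the association list (= the Python dict the caller built).

-- ===== PORT A =====
def generate_neighbors (barcode : String) (alphabet : String) : PySem.Set String :=
  let bc := barcode.toList
  (List.range bc.length).foldl (fun ns i =>
    alphabet.toList.foldl (fun ns c =>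
      if c ≠ bc.getD i ' ' then PySem.Set.add ns (String.mk (bc.set i c)) else ns) ns)
    PySem.Set.empty

def build_neighbor_dict (barcode_to_sample : List (String × String)) (alphabet : String) : List (String × Option String) :=
  let exact := PySem.Dict.ofList barcode_to_sample
  (exact.items.foldl (fun nd p =>
    (generate_neighbors p.1 alphabet).foldl (fun nd nb =>
      if exact.contains nb = true then nd
      else if nd.contains nb = true ∧ nd.getD nb none ≠ some p.2 then nd.insert nb none
      else nd.insert nb (some p.2)) nd)
    PySem.Dict.empty).items

-- ===== PORT B =====
def neighbor_candidates (barcode : String) (alphabet : String) : List String :=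
  let bc := barcode.toList
  PySem.List.dedup ((List.range bc.length).flatMap (fun i =>
    (alphabet.toList.filter (fun c => c ≠ bc.getD i ' ')).map (fun c =>
      String.mk (PySem.List.slice bc none (some (i : Int)) ++ [c] ++
                 PySem.List.slice bc (some ((i : Int) + 1)) none))))

def build_neighbor_dict_alt (barcode_to_sample : List (String × String)) (alphabet : String) : List (String × Option String) :=
  let exact := PySem.Dict.ofList barcode_to_sample
  let gathered := exact.items.foldl (fun g p =>
    (neighbor_candidates p.1 alphabet).foldl (fun g nb =>
      if exact.contains nb = true then g
      else PySem.Dict.modify g nb [] (fun l => l ++ [p.2])) g)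
    PySem.Dict.empty
  gathered.items.map (fun q =>
    match q.2 with
    | [] => (q.1, none)
    | h :: t => (q.1, if t.all (fun s => s == h) then some h else none))

-- ===== PRECONDITION & SPEC =====
def Spec_build_neighbor_dict (barcode_to_sample : List (String × String)) (alphabet : String) (out : List (String × Option String)) : Prop := out = build_neighbor_dict_alt barcode_to_sample alphabet
instance (barcode_to_sample : List (String × String)) (alphabet : String) (out : List (String × Option String)) : Decidable (Spec_build_neighbor_dict barcode_to_sample alphabet out) := by unfold Spec_build_neighbor_dict; infer_instance

-- ===== CLAIM (what is proved, stated in full; the proofs are below) =====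
def Claim_equal_build_neighbor_dict : Prop := ∀ (barcode_to_sample : List (String × String)) (alphabet : String), Dom_build_neighbor_dict barcode_to_sample alphabet → Spec_build_neighbor_dict barcode_to_sample alphabet (build_neighbor_dict barcode_to_sample alphabet)

-- ===== LEMMAS AND PROOFS =====

-- collapse of a gathered sample list: its unique value, or none when ambiguous
def pvCollapse (l : List String) : Option String :=
  match l with
  | [] => none
  | h :: t => if t.all (fun s => s == h) then some h else none

def pvResolve (q : String × List String) : String × Option String := (q.1, pvCollapse q.2)

-- "well-formed gathered dict": all value lists nonempty, keys distinct
def pvGood (g : PySem.Dict String (List String)) : Prop :=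
  (∀ q ∈ g.items, q.2 ≠ []) ∧ (g.items.map Prod.fst).Nodup

theorem pvMap_resolve (L : List (String × List String)) :
    L.map (fun q => match q.2 with
      | [] => (q.1, (none : Option String))
      | h :: t => (q.1, if t.all (fun s => s == h) then some h else none))
    = L.map pvResolve := by
  apply List.map_congr_left
  intro q _
  cases hq : q.2 <;> simp [pvResolve, pvCollapse, hq]

theorem pvCollapse_append (v : List String) (s : String) (hv : v ≠ []) :
    pvCollapse (v ++ [s]) = if pvCollapse v = some s then some s else none := by
  cases v with
  | nil => exact absurd rfl hv
  | cons h t =>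
    by_cases hs : s = h
    · have hsh : (s == h) = true := beq_iff_eq.mpr hs
      by_cases ht : (t.all fun x => x == h) = true
      · simp [pvCollapse, List.all_append, ht, hs]
      · simp [pvCollapse, List.all_append, ht, hs]
    · have hsh : (s == h) = false := beq_eq_false_iff_ne.mpr hs
      have hhs : ¬ (h = s) := fun e => hs e.symm
      by_cases ht : (t.all fun x => x == h) = true
      · simp [pvCollapse, List.all_append, ht, hsh, hhs]
      · simp [pvCollapse, List.all_append, ht, hsh]

theorem pvFind_key_of_nodup {α : Type} (L : List (String × α)) (hnd : (L.map Prod.fst).Nodup)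
    (p : String × α) (hp : p ∈ L) : L.find? (fun q => q.1 == p.1) = some p := by
  induction L with
  | nil => cases hp
  | cons a L ih =>
    simp only [List.map_cons, List.nodup_cons] at hnd
    cases hp with
    | head => simp [List.find?]
    | tail _ hp' =>
      have hne : (a.1 == p.1) = false := by
        refine beq_eq_false_iff_ne.mpr ?_
        intro h
        exact hnd.1 (h ▸ List.mem_map_of_mem hp')
      simp only [List.find?, hne]
      exact ih hnd.2 hp'

-- contains of the resolved dict = contains of the gathered dict
theorem pvContains_resolve (L : List (String × List String)) (nb : String) :
    (PySem.Dict.mk (L.map pvResolve)).contains nb = (PySem.Dict.mk L).contains nb := by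
  have hcomp : ((fun p : String × Option String => p.1 == nb) ∘ pvResolve)
      = (fun q : String × List String => q.1 == nb) := funext (fun _ => rfl)
  simp only [PySem.Dict.contains, List.any_map, hcomp]

-- ONE event (neighbor nb, sample s): A's sticky update mirrors B's append under pvResolve
theorem pvStep_core (g : PySem.Dict String (List String)) (nb s : String) (hg : pvGood g) :
    (if (PySem.Dict.mk (g.items.map pvResolve)).contains nb = true ∧
        (PySem.Dict.mk (g.items.map pvResolve)).getD nb none ≠ some s
     then (PySem.Dict.mk (g.items.map pvResolve)).insert nb none
     else (PySem.Dict.mk (g.items.map pvResolve)).insert nb (some s))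
    = PySem.Dict.mk ((PySem.Dict.modify g nb [] (fun l => l ++ [s])).items.map pvResolve) := by
  obtain ⟨hne, hnd⟩ := hg
  obtain ⟨L⟩ := g
  by_cases hc : (PySem.Dict.mk L).contains nb = true
  · -- nb already gathered: both replace the (unique) entry in place
    have hfind : ∃ p ∈ L, p.1 = nb ∧ L.find? (fun q => q.1 == nb) = some p := by
      simp only [PySem.Dict.contains, List.any_eq_true, beq_iff_eq] at hc
      obtain ⟨p, hpL, hpk⟩ := hc
      exact ⟨p, hpL, hpk, by simpa [hpk] using pvFind_key_of_nodup L hnd p hpL⟩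
    obtain ⟨p, hpL, hpk, hpf⟩ := hfind
    have hvne : p.2 ≠ [] := hne p hpL
    have hget : (PySem.Dict.mk (L.map pvResolve)).getD nb none = pvCollapse p.2 := by
      have hcomp : ((fun q : String × Option String => q.1 == nb) ∘ pvResolve)
          = (fun q : String × List String => q.1 == nb) := funext (fun _ => rfl)
      simp only [PySem.Dict.getD, PySem.Dict.get?, List.find?_map, hcomp, hpf]
      simp [pvResolve]
    have hcr : (PySem.Dict.mk (L.map pvResolve)).contains nb = true := by
      rw [pvContains_resolve]; exact hc
    have hgetg : PySem.Dict.getD (PySem.Dict.mk L) nb [] = p.2 := by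
      simp [PySem.Dict.getD, PySem.Dict.get?, hpf]
    have hmain : ∀ x : Option String,
        pvCollapse (p.2 ++ [s]) = x →
        (PySem.Dict.mk (L.map pvResolve)).insert nb x
          = PySem.Dict.mk ((PySem.Dict.modify (PySem.Dict.mk L) nb [] (fun l => l ++ [s])).items.map pvResolve) := by
      intro x hx
      simp only [PySem.Dict.modify, hgetg, PySem.Dict.insert, hc, hcr, if_pos]
      congr 1
      simp only [List.map_map]
      apply List.map_congr_left
      intro q hqL
      by_cases hq : (q.1 == nb) = true
      · have hq' : q.1 = nb := beq_iff_eq.mp hq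
        have hfq := pvFind_key_of_nodup L hnd q hqL
        rw [hq'] at hfq
        have hqp : q = p := Option.some_injective _ (hfq.symm.trans hpf)
        subst hqp
        simp [Function.comp, pvResolve, hq, hx]
      · simp [Function.comp, pvResolve, hq]
    by_cases hcond : (PySem.Dict.mk (L.map pvResolve)).getD nb none ≠ some s
    · rw [if_pos ⟨hcr, hcond⟩]
      apply hmain
      rw [pvCollapse_append p.2 s hvne, if_neg (by rw [← hget]; exact hcond)]
    · rw [if_neg (by intro h; exact hcond h.2)]
      rw [not_not] at hcond
      have hx : pvCollapse (p.2 ++ [s]) = some s := by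
        rw [pvCollapse_append p.2 s hvne, if_pos (by rw [← hget]; exact hcond)]
      exact hmain _ hx
  · -- nb fresh: both append a new entry
    rw [Bool.not_eq_true] at hc
    have hcr : (PySem.Dict.mk (L.map pvResolve)).contains nb = false := by
      rw [pvContains_resolve]; exact hc
    have hc' : ∀ q ∈ L, ¬ ((q.1 == nb) = true) := by
      intro q hq hb
      have hct : (PySem.Dict.mk L).contains nb = true := by
        simp only [PySem.Dict.contains, List.any_eq_true]; exact ⟨q, hq, hb⟩
      simp [hc] at hct
    have hgetg : PySem.Dict.getD (PySem.Dict.mk L) nb [] = [] := by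
      simp [PySem.Dict.getD, PySem.Dict.get?, List.find?_eq_none.mpr hc']
    rw [if_neg (by intro hAnd; rw [hcr] at hAnd; simp at hAnd)]
    simp only [PySem.Dict.modify, hgetg, PySem.Dict.insert, hcr, hc,
      Bool.false_eq_true, if_false, List.nil_append]
    congr 1
    simp [pvResolve, pvCollapse]

theorem pvStep_good (g : PySem.Dict String (List String)) (nb s : String) (hg : pvGood g) :
    pvGood (PySem.Dict.modify g nb [] (fun l => l ++ [s])) := by
  obtain ⟨hne, hnd⟩ := hg
  obtain ⟨L⟩ := g
  by_cases hc : (PySem.Dict.mk L).contains nb = true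
  · have hgetne : PySem.Dict.getD (PySem.Dict.mk L) nb [] ++ [s] ≠ [] := by simp
    constructor
    · intro q hq
      simp only [PySem.Dict.modify, PySem.Dict.insert, hc, if_pos,
        List.mem_map] at hq
      obtain ⟨r, hrL, hrq⟩ := hq
      by_cases hr : (r.1 == nb) = true
      · rw [if_pos hr] at hrq; rw [← hrq]; simp
      · rw [if_neg hr] at hrq
        rw [← hrq]; exact hne r hrL
    · simp only [PySem.Dict.modify, PySem.Dict.insert, hc, if_pos]
      have : (L.map (fun p => if (p.1 == nb) = true then (nb, PySem.Dict.getD (PySem.Dict.mk L) nb [] ++ [s]) else p)).map Prod.fst = L.map Prod.fst := by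
        simp only [List.map_map]
        apply List.map_congr_left
        intro q _
        by_cases hq : (q.1 == nb) = true
        · simp [Function.comp, (beq_iff_eq.mp hq).symm]
        · simp [Function.comp, hq]
      rw [this]; exact hnd
  · constructor
    · intro q hq
      simp only [PySem.Dict.modify, PySem.Dict.insert, hc, Bool.false_eq_true, if_false,
        List.mem_append, List.mem_singleton] at hq
      rcases hq with hq | hq
      · exact hne q hq
      · rw [hq]; simp
    · simp only [PySem.Dict.modify, PySem.Dict.insert, hc, Bool.false_eq_true, if_false,
        List.map_append]
      simp only [List.map_cons, List.map_nil]
      rw [List.nodup_append]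
      refine ⟨hnd, List.nodup_singleton _, ?_⟩
      intro a ha b hb
      simp only [List.mem_singleton] at hb
      subst hb
      intro heq
      obtain ⟨q, hqL, hqa⟩ := List.mem_map.mp ha
      apply hc
      simp only [PySem.Dict.contains, List.any_eq_true]
      exact ⟨q, hqL, by simp [hqa, heq]⟩

-- A's guarded add-loop over the alphabet = fold of Set.add over B's filtered/mapped candidates
theorem pvInnerGen (cs : List Char) (o : Char) (F : Char → String) (s : PySem.Set String) :
    cs.foldl (fun ns c => if c ≠ o then PySem.Set.add ns (F c) else ns) s
    = ((cs.filter (fun c => c ≠ o)).map F).foldl PySem.Set.add s := by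
  induction cs generalizing s with
  | nil => rfl
  | cons a cs ih =>
    by_cases ha : a ≠ o
    · rw [List.foldl_cons, if_pos ha, List.filter_cons, if_pos (decide_eq_true ha),
        List.map_cons, List.foldl_cons]
      exact ih _
    · rw [List.foldl_cons, if_neg ha, List.filter_cons, if_neg (by simpa using ha)]
      exact ih _

-- the two neighbor enumerations produce the same list (same first-insertion order)
theorem pvGen_eq (b al : String) : generate_neighbors b al = neighbor_candidates b al := by
  simp only [generate_neighbors, neighbor_candidates, PySem.List.dedup,
    PySem.Set.ofList_eq_foldl, List.foldl_flatMap]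
  apply PySem.List.foldl_congr_mem
  intro ns i hi
  have hilt : i < b.toList.length := List.mem_range.mp hi
  rw [pvInnerGen]
  congr 1
  apply List.map_congr_left
  intro c _
  congr 1
  rw [PySem.List.slice_to_natCast]
  have hcast : ((i : Int) + 1) = ((i + 1 : Nat) : Int) := by push_cast; ring
  rw [hcast, PySem.List.slice_from_natCast]
  have hilt' : i < b.length := by simpa using hilt
  simp only [List.set_eq_take_append_cons_drop]
  rw [if_pos hilt]
  simp

-- the inner loop (over one barcode's neighbors), in lockstep
theorem pvInner_ok (exact : PySem.Dict String String) (nbs : List String) (s : String)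
    (g : PySem.Dict String (List String)) (hg : pvGood g) :
    (nbs.foldl (fun nd nb =>
        if exact.contains nb = true then nd
        else if nd.contains nb = true ∧ nd.getD nb none ≠ some s then nd.insert nb none
        else nd.insert nb (some s)) (PySem.Dict.mk (g.items.map pvResolve)))
      = PySem.Dict.mk ((nbs.foldl (fun g nb =>
        if exact.contains nb = true then g
        else PySem.Dict.modify g nb [] (fun l => l ++ [s])) g).items.map pvResolve)
    ∧ pvGood (nbs.foldl (fun g nb =>
        if exact.contains nb = true then g
        else PySem.Dict.modify g nb [] (fun l => l ++ [s])) g) := by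
  induction nbs generalizing g with
  | nil => exact ⟨rfl, hg⟩
  | cons nb nbs ih =>
    simp only [List.foldl_cons]
    by_cases hc : exact.contains nb = true
    · simp only [hc, if_pos]
      exact ih g hg
    · simp only [hc, Bool.false_eq_true, if_false]
      rw [pvStep_core g nb s hg]
      exact ih _ (pvStep_good g nb s hg)

-- the outer loop (over the exact dict's items), in lockstep
theorem pvOuter_ok (exact : PySem.Dict String String) (al : String)
    (ps : List (String × String)) (g : PySem.Dict String (List String)) (hg : pvGood g) :
    (ps.foldl (fun nd p =>
        (generate_neighbors p.1 al).foldl (fun nd nb =>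
          if exact.contains nb = true then nd
          else if nd.contains nb = true ∧ nd.getD nb none ≠ some p.2 then nd.insert nb none
          else nd.insert nb (some p.2)) nd) (PySem.Dict.mk (g.items.map pvResolve)))
      = PySem.Dict.mk ((ps.foldl (fun g p =>
        (neighbor_candidates p.1 al).foldl (fun g nb =>
          if exact.contains nb = true then g
          else PySem.Dict.modify g nb [] (fun l => l ++ [p.2])) g) g).items.map pvResolve) := by
  induction ps generalizing g with
  | nil => rfl
  | cons p ps ih =>
    simp only [List.foldl_cons]
    rw [pvGen_eq p.1 al]
    obtain ⟨heq, hgood⟩ := pvInner_ok exact (neighbor_candidates p.1 al) p.2 g hg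
    rw [heq]
    exact ih _ hgood

-- ===== VERDICT (by name: the statement is the Claim_ definition above) =====
theorem build_neighbor_dict_spec : Claim_equal_build_neighbor_dict := by
  intro bts al _
  unfold Spec_build_neighbor_dict build_neighbor_dict build_neighbor_dict_alt
  simp only []
  rw [pvMap_resolve]
  have h := pvOuter_ok (PySem.Dict.ofList bts) al (PySem.Dict.ofList bts).items
    PySem.Dict.empty ⟨(by intro q hq; simp [PySem.Dict.empty] at hq), (by simp [PySem.Dict.empty])⟩
  simp only [PySem.Dict.empty, List.map_nil] at h
  simp only [PySem.Dict.empty]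
  rw [h]
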